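-- pv_equiv track=rewrite | github.com/ehenneken/ADS_records_merger | merger.py | group_subfields_per_indicator
-- ===== SOURCE A (Python) =====
-- def group_subfields_per_indicator(subfields):
--     """Function that groups a bunch of subfield per indicator"""
--     grouped_subfields = {}
--     for subfield in subfields:
--         # Extract the indicators
--         indicator1 = subfield[0][1]
--         if indicator1 == ' ':
--             indicator1 = '_'
--         indicator2 = subfield[0][2]
--         if indicator2 == ' ':
--             indicator2 = '_'
--         grouped_subfields.setdefault(indicator1+indicator2, []).append(subfield)
--     return grouped_subfields
-- ===== SOURCE B (Python) =====
-- def group_subfields_per_indicator(subfields):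
--     """Group subfields per indicator: precompute the key list, then build each group by filtering."""
--     def key(sf):
--         ind1 = sf[0][1]
--         ind2 = sf[0][2]
--         return ('_' if ind1 == ' ' else ind1) + ('_' if ind2 == ' ' else ind2)
--     keys = list(dict.fromkeys(key(sf) for sf in subfields))
--     return {k: [sf for sf in subfields if key(sf) == k] for k in keys}
-- ===== Notes on version B (the rewrite author's own statement) =====
-- stated objective: alternative
-- what changed: Replaces the single setdefault-append accumulation loop by a two-phase grouping: first collect the distinct indicator keys in first-occurrence order (dict.fromkeys), then build each group with a filtering comprehension over the input.
import Mathlib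
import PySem

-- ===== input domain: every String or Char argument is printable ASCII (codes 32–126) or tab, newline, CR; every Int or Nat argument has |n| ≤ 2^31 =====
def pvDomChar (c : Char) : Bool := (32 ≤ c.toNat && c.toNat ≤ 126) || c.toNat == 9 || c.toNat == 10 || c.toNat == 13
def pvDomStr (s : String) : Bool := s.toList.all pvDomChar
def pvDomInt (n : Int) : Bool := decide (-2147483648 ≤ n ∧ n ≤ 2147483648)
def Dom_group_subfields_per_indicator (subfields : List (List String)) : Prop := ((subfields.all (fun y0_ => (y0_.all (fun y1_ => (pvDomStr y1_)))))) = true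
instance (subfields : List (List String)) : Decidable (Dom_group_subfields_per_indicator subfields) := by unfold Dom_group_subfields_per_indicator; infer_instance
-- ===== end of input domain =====

-- B replaces A's setdefault-append loop by two phases — distinct keys in first-occurrence order, then one filter per key — an alternative decomposition of the same grouping (not faster).


-- ===== PORT A =====
-- indicator key of a subfield: subfield[0][1] and subfield[0][2], ' ' mapped to '_'
-- (pyGet? defaults resolve only outside Pre_, where Python raises IndexError)
def pvKeyA (sf : List String) : String :=
  let s0 := (PySem.List.pyGet? sf 0).getD ""
  let i1 := (PySem.Str.pyGet? s0 1).getD ' '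
  let i1 := if i1 = ' ' then '_' else i1
  let i2 := (PySem.Str.pyGet? s0 2).getD ' '
  let i2 := if i2 = ' ' then '_' else i2
  String.singleton i1 ++ String.singleton i2

def group_subfields_per_indicator (subfields : List (List String)) : List (String × List (List String)) :=
  (subfields.foldl
    (fun d sf => d.modify (pvKeyA sf) [] (fun g => g ++ [sf]))
    (PySem.Dict.empty : PySem.Dict String (List (List String)))).items

-- ===== PORT B =====
def pvKeyB (sf : List String) : String :=
  let ind1 := (PySem.Str.pyGet? ((PySem.List.pyGet? sf 0).getD "") 1).getD ' '
  let ind2 := (PySem.Str.pyGet? ((PySem.List.pyGet? sf 0).getD "") 2).getD ' '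
  String.singleton (if ind1 = ' ' then '_' else ind1) ++ String.singleton (if ind2 = ' ' then '_' else ind2)

def group_subfields_per_indicator_alt (subfields : List (List String)) : List (String × List (List String)) :=
  let keys := PySem.Set.ofList (subfields.map pvKeyB)
  keys.map (fun k => (k, subfields.filter (fun sf => pvKeyB sf == k)))

-- ===== PRECONDITION & SPEC =====
-- Pre_ excludes exactly the inputs where Python A raises IndexError: a subfield that is
-- the empty list or whose first string has fewer than 3 characters.
def Pre_group_subfields_per_indicator (subfields : List (List String)) : Prop :=
  ∀ sf ∈ subfields, sf ≠ [] ∧ 3 ≤ (sf.headD "").length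
instance (subfields : List (List String)) : Decidable (Pre_group_subfields_per_indicator subfields) := by
  unfold Pre_group_subfields_per_indicator; infer_instance

def pvWitness_group_subfields_per_indicator : List (List String) :=
  [["a1 ", "v1"], ["a12", "v2"], ["b1 "]]

def Spec_group_subfields_per_indicator (subfields : List (List String)) (out : List (String × List (List String))) : Prop := out = group_subfields_per_indicator_alt subfields
instance (subfields : List (List String)) (out : List (String × List (List String))) : Decidable (Spec_group_subfields_per_indicator subfields out) := by unfold Spec_group_subfields_per_indicator; infer_instance

-- ===== CLAIM (what is proved, stated in full; the proofs are below) =====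
def Claim_equal_group_subfields_per_indicator : Prop := ∀ (subfields : List (List String)), Dom_group_subfields_per_indicator subfields → Pre_group_subfields_per_indicator subfields → Spec_group_subfields_per_indicator subfields (group_subfields_per_indicator subfields)

-- ===== LEMMAS AND PROOFS =====

theorem pvKey_eq (sf : List String) : pvKeyA sf = pvKeyB sf := rfl

-- A's accumulated dict, viewed through getD, is exactly B's filter
theorem pvGetD_fold (subfields : List (List String)) (k : String) :
    ((subfields.foldl
        (fun d sf => d.modify (pvKeyB sf) [] (fun g => g ++ [sf]))
        (PySem.Dict.empty : PySem.Dict String (List (List String)))).getD k [])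
      = subfields.filter (fun sf => pvKeyB sf == k) := by
  have h := PySem.Dict.getD_foldl_modify_append
      (l := subfields.map (fun sf => (pvKeyB sf, sf)))
      (d := (PySem.Dict.empty : PySem.Dict String (List (List String)))) (c := k)
  rw [List.foldl_map] at h
  simpa [List.filter_map, Function.comp_def] using h

theorem group_subfields_per_indicator_spec : Claim_equal_group_subfields_per_indicator := by
  intro subfields _ _
  unfold Spec_group_subfields_per_indicator group_subfields_per_indicator group_subfields_per_indicator_alt
  have hnd : ((subfields.foldl
      (fun d sf => d.modify (pvKeyA sf) [] (fun g => g ++ [sf]))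
      (PySem.Dict.empty : PySem.Dict String (List (List String)))).keys).Nodup := by
    exact PySem.Dict.nodup_keys_foldl_modify_key subfields pvKeyA [] _ _ (by simp [PySem.Dict.keys_empty])
  rw [PySem.Dict.items_eq_map_keys _ hnd ([] : List (List String))]
  rw [PySem.Dict.keys_foldl_modify_key]
  simp only [PySem.Dict.keys_empty, PySem.Set.update_nil_left, pvKey_eq]
  exact List.map_congr_left (fun k _ => by rw [pvGetD_fold])
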